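-- pv_equiv track=rewrite | github.com/Blajszu/Graph_Algorithms_Course | Project 1/solve_optimal.py | build_conflict_graph
-- ===== SOURCE A (Python) =====
-- def build_conflict_graph(paths):
--     num_paths = len(paths)
--     conflicts = [set() for _ in range(num_paths)]
--     path_sets = [set(path) for path in paths]
--     edge_sets = []
--
--     for path in paths:
--         edges = set()
--
--         for i in range(len(path) - 1):
--             u, v = path[i], path[i + 1]
--             edges.add((min(u, v), max(u, v)))
--
--         edge_sets.append(edges)
--
--     for i in range(num_paths):
--
--         for j in range(i + 1, num_paths):
--
--             if not path_sets[i].isdisjoint(path_sets[j]):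
--                 conflicts[i].add(j)
--                 conflicts[j].add(i)
--
--             elif not edge_sets[i].isdisjoint(edge_sets[j]):
--                 conflicts[i].add(j)
--                 conflicts[j].add(i)
--
--     return [list(c) for c in conflicts]
-- ===== SOURCE B (Python) =====
-- def build_conflict_graph(paths):
--     num_paths = len(paths)
--     masks = {}
--     for idx, path in enumerate(paths):
--         bit = 1 << idx
--         for v in set(path):
--             masks[v] = masks.get(v, 0) | bit
--     conflicts = [set() for _ in range(num_paths)]
--     for i, path in enumerate(paths):
--         m = 0
--         for v in set(path):
--             m |= masks[v]
--         m >>= i + 1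
--         j = i + 1
--         while m:
--             if m & 1:
--                 conflicts[i].add(j)
--                 conflicts[j].add(i)
--             m >>= 1
--             j += 1
--     return [list(c) for c in conflicts]
-- ===== Notes on version B (the rewrite author's own statement) =====
-- stated objective: alternative
-- what changed: Instead of testing every pair of paths with set.isdisjoint on vertex sets and then on edge sets (the edge test is redundant, since paths sharing an edge also share its endpoints), B builds one vertex -> bitmask-of-path-ids index in a single pass and ORs the bitmasks of each path's vertices to get all its conflict partners at once, decoding the bits into the adjacency sets.
import Mathlib
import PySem

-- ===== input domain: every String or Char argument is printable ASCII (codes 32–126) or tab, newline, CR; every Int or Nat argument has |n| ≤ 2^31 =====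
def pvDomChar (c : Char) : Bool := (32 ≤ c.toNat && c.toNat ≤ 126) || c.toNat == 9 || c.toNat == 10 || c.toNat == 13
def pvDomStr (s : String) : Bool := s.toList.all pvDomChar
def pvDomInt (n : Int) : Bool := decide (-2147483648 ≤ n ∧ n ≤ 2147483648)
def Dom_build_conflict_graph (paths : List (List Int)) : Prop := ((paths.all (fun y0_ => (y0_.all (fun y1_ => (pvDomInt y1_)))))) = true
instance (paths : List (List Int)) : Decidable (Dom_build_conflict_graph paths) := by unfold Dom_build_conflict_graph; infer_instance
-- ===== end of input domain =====

-- ===== PORT A =====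
-- B replaces A's pairwise disjointness scanning by a vertex -> path-id-bitmask index (the redundant
-- edge test disappears: paths sharing an edge always share its endpoints).
-- Shared output helper for the final statement '[list(c) for c in conflicts]' of BOTH Pythons:
-- 'list(s)' yields a CPython set's elements in hash-table slot order.  Hand port (no PySem primitive for
-- set iteration order): an exact step-for-step model of CPython's set table (open addressing, LINEAR_PROBES = 9,
-- PERTURB_SHIFT = 5, growth x4 at fill*5 >= mask*3) for distinct non-negative ints (hash = value), which is
-- exactly what these conflict sets hold (path indices, inserted in increasing order).
def pvScan (tbl : List (Option Int)) : Nat → Nat → Option Nat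
  | i, 0 => if (tbl.getD i (some 0)).isNone then some i else none
  | i, k + 1 => if (tbl.getD i (some 0)).isNone then some i else pvScan tbl (i + 1) k

def pvFindSlot (tbl : List (Option Int)) (size : Nat) : Nat → Nat → Nat → Nat
  | 0, i, _ => i  -- fuel exhausted; unreachable (the table always has a free slot)
  | fuel + 1, i, perturb =>
    let probes := if i + 9 ≤ size - 1 then 9 else 0
    match pvScan tbl i probes with
    | some j => j
    | none =>
      let p' := perturb >>> 5
      pvFindSlot tbl size fuel ((i * 5 + 1 + p') % size) p'

def pvPlace (tbl : List (Option Int)) (size : Nat) (k : Int) : List (Option Int) :=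
  tbl.set (pvFindSlot tbl size (size + 64) (k.toNat % size) k.toNat) (some k)

def pvNewSize : Nat → Nat → Nat
  | 0, _ => 8
  | fuel + 1, minused => if 8 * 2 ^ fuel ≤ minused then 8 * 2 ^ (fuel + 1) else pvNewSize fuel minused

def pvSetStep (st : List (Option Int) × Nat × Nat) (k : Int) : List (Option Int) × Nat × Nat :=
  let tbl := pvPlace st.1 st.2.1 k
  let fill := st.2.2 + 1
  if fill * 5 ≥ (st.2.1 - 1) * 3 then
    let minused := if fill ≤ 50000 then fill * 4 else fill * 2
    let newsize := pvNewSize 64 minused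
    ((tbl.filterMap id).foldl (fun t h => pvPlace t newsize h) (List.replicate newsize none), newsize, fill)
  else (tbl, st.2.1, fill)

def pySetList (keys : List Int) : List Int :=
  (keys.foldl pvSetStep (List.replicate 8 none, 8, 0)).1.filterMap id

-- 'conflicts[i].add(j); conflicts[j].add(i)' — the identical pair of statements in both Pythons
def conflictAdd (cs : List (PySem.Set Int)) (i j : Int) : List (PySem.Set Int) :=
  let cs' := cs.set i.toNat (PySem.Set.add (cs.getD i.toNat []) j)
  cs'.set j.toNat (PySem.Set.add (cs'.getD j.toNat []) i)

-- the edge-collecting inner loop of A (indices always in range, so pyGetD's default is never used)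
def edgesOf (path : List Int) : PySem.Set (Int × Int) :=
  (PySem.List.pyRange 0 ((path.length : Int) - 1)).foldl
    (fun edges i =>
      let u := PySem.List.pyGetD path i 0
      let v := PySem.List.pyGetD path (i + 1) 0
      PySem.Set.add edges (min u v, max u v))
    PySem.Set.empty

-- one iteration of A's inner pair loop (the if/elif over the two disjointness tests)
def pairCheck (path_sets : List (PySem.Set Int)) (edge_sets : List (PySem.Set (Int × Int)))
    (cs : List (PySem.Set Int)) (i j : Int) : List (PySem.Set Int) :=
  if !(PySem.Set.isdisjoint (path_sets.getD i.toNat []) (path_sets.getD j.toNat [])) then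
    conflictAdd cs i j
  else if !(PySem.Set.isdisjoint (edge_sets.getD i.toNat []) (edge_sets.getD j.toNat [])) then
    conflictAdd cs i j
  else cs

def build_conflict_graph (paths : List (List Int)) : List (List Int) :=
  let num_paths : Int := (paths.length : Int)
  let conflicts : List (PySem.Set Int) :=
    (PySem.List.pyRange 0 num_paths).map (fun _ => PySem.Set.empty)
  let path_sets : List (PySem.Set Int) := paths.map (fun p => PySem.Set.ofList p)
  let edge_sets : List (PySem.Set (Int × Int)) :=
    paths.foldl (fun es path => es ++ [edgesOf path]) []
  let conflicts :=
    (PySem.List.pyRange 0 num_paths).foldl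
      (fun cs i =>
        (PySem.List.pyRange (i + 1) num_paths).foldl
          (fun cs j => pairCheck path_sets edge_sets cs i j)
          cs)
      conflicts
  conflicts.map (fun c => pySetList c)

-- ===== PORT B =====
-- bit loop of B: 'while m: if m & 1: conflicts[i].add(j); conflicts[j].add(i); m >>= 1; j += 1'
-- 'm & 1' is PySem.Int.band; 'm >> 1' is exactly floor division by 2 (every int); the mask m is
-- non-negative here, so the 'm ≤ 0' guard is exactly Python's 'while m'.
def emitBits (i : Int) (cs : List (PySem.Set Int)) (m j : Int) : List (PySem.Set Int) :=
  if _hm : m ≤ 0 then cs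
  else
    let cs' := if PySem.Int.band m 1 = 1 then conflictAdd cs i j else cs
    emitBits i cs' (PySem.Int.floordiv m 2) (j + 1)
termination_by m.toNat
decreasing_by
  rw [PySem.Int.floordiv_eq_ediv_of_pos (by omega : (0:Int) < 2)]
  omega

def build_conflict_graph_alt (paths : List (List Int)) : List (List Int) :=
  let num_paths : Int := (paths.length : Int)
  -- masks[v] = bitmask of the ids of the paths that contain vertex v
  -- ('1 << idx' with idx = ip.1 ≥ 0 from enumerate is exactly 2 ^ idx)
  let masks : PySem.Dict Int Int :=
    (PySem.List.enumerate paths).foldl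
      (fun masks ip =>
        (PySem.Set.ofList ip.2).foldl
          (fun masks v => masks.insert v (PySem.Int.bor (masks.getD v 0) ((2 : Int) ^ ip.1.toNat)))
          masks)
      PySem.Dict.empty
  let conflicts : List (PySem.Set Int) :=
    (PySem.List.pyRange 0 num_paths).map (fun _ => PySem.Set.empty)
  let conflicts :=
    (PySem.List.enumerate paths).foldl
      (fun cs ip =>
        let m := (PySem.Set.ofList ip.2).foldl
          (fun m v => PySem.Int.bor m (masks.getD v 0)) 0
        -- 'm >>= i + 1' is exactly floor division by 2 ^ (i + 1)
        emitBits ip.1 cs (PySem.Int.floordiv m ((2 : Int) ^ (ip.1 + 1).toNat)) (ip.1 + 1))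
      conflicts
  conflicts.map (fun c => pySetList c)

-- ===== PRECONDITION & SPEC =====
def Spec_build_conflict_graph (paths : List (List Int)) (out : List (List Int)) : Prop := out = build_conflict_graph_alt paths
instance (paths : List (List Int)) (out : List (List Int)) : Decidable (Spec_build_conflict_graph paths out) := by unfold Spec_build_conflict_graph; infer_instance

-- ===== CLAIM (what is proved, stated in full; the proofs are below) =====
def Claim_equal_build_conflict_graph : Prop := ∀ (paths : List (List Int)), Dom_build_conflict_graph paths → Spec_build_conflict_graph paths (build_conflict_graph paths)

-- ===== LEMMAS AND PROOFS =====

-- proof-only abbreviations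
def nI (paths : List (List Int)) : Int := (paths.length : Int)

def pathSets (paths : List (List Int)) : List (PySem.Set Int) := paths.map (fun p => PySem.Set.ofList p)

def condV (paths : List (List Int)) (p : Int × Int) : Bool :=
  !(PySem.Set.isdisjoint ((pathSets paths).getD p.1.toNat []) ((pathSets paths).getD p.2.toNat []))

def edgeSets (paths : List (List Int)) : List (PySem.Set (Int × Int)) :=
  paths.foldl (fun es path => es ++ [edgesOf path]) []

def condE (paths : List (List Int)) (p : Int × Int) : Bool :=
  !(PySem.Set.isdisjoint ((edgeSets paths).getD p.1.toNat []) ((edgeSets paths).getD p.2.toNat []))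

def LP (paths : List (List Int)) : List (Int × Int) :=
  (PySem.List.pyRange 0 (nI paths)).flatMap
    (fun i => (PySem.List.pyRange (i + 1) (nI paths)).map (fun j => (i, j)))

def LPf (paths : List (List Int)) : List (Int × Int) := (LP paths).filter (condV paths)

def initC (paths : List (List Int)) : List (PySem.Set Int) :=
  (PySem.List.pyRange 0 (nI paths)).map (fun _ => PySem.Set.empty)

def masksOf (paths : List (List Int)) : PySem.Dict Int Int :=
  (PySem.List.enumerate paths).foldl
    (fun masks ip =>
      (PySem.Set.ofList ip.2).foldl
        (fun masks v => masks.insert v (PySem.Int.bor (masks.getD v 0) ((2 : Int) ^ ip.1.toNat)))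
        masks)
    PySem.Dict.empty

def bigM (paths : List (List Int)) (path : List Int) : Int :=
  (PySem.Set.ofList path).foldl (fun m v => PySem.Int.bor m ((masksOf paths).getD v 0)) 0

def bitsFrom (m j : Int) : List Int :=
  if _hm : m ≤ 0 then []
  else (if PySem.Int.band m 1 = 1 then [j] else []) ++ bitsFrom (PySem.Int.floordiv m 2) (j + 1)
termination_by m.toNat
decreasing_by
  rw [PySem.Int.floordiv_eq_ediv_of_pos (by omega : (0:Int) < 2)]
  omega

-- generic fold helpers
theorem foldl_mem_iff {A B : Type} (l : List A) (step : List B -> A -> List B)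
    (Q : A -> B -> Prop)
    (h : ∀ s e x, x ∈ step s e ↔ x ∈ s ∨ Q e x) :
    ∀ s x, (x ∈ l.foldl step s ↔ x ∈ s ∨ ∃ e ∈ l, Q e x) := by
  induction l with
  | nil => simp
  | cons a t ih =>
    intro s x
    simp only [List.foldl_cons, ih, h, List.mem_cons]
    constructor
    · rintro ((hx | hq) | ⟨e, he, hq⟩)
      · exact Or.inl hx
      · exact Or.inr ⟨a, Or.inl rfl, hq⟩
      · exact Or.inr ⟨e, Or.inr he, hq⟩
    · rintro (hx | ⟨e, (rfl | he), hq⟩)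
      · exact Or.inl (Or.inl hx)
      · exact Or.inl (Or.inr hq)
      · exact Or.inr ⟨e, he, hq⟩

theorem pyRange_eq_nil_of_le {a b : Int} (h : b ≤ a) : PySem.List.pyRange a b = [] := by
  rw [List.eq_nil_iff_forall_not_mem]
  intro x hx
  rw [PySem.List.mem_pyRange_one] at hx
  omega

theorem pairwise_lt_pyRange_aux : ∀ (k : Nat) (a b : Int), (b - a).toNat = k →
    (PySem.List.pyRange a b).Pairwise (· < ·) := by
  intro k
  induction k with
  | zero =>
    intro a b hk
    rw [pyRange_eq_nil_of_le (by omega)]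
    exact List.Pairwise.nil
  | succ k ih =>
    intro a b hk
    rw [PySem.List.pyRange_one_cons (by omega)]
    refine List.Pairwise.cons ?_ (ih (a + 1) b (by omega))
    intro x hx
    rw [PySem.List.mem_pyRange_one] at hx
    omega

theorem pairwise_lt_pyRange (a b : Int) : (PySem.List.pyRange a b).Pairwise (· < ·) :=
  pairwise_lt_pyRange_aux (b - a).toNat a b rfl

theorem getD_map_lt {A B : Type} (l : List A) (f : A -> B) (k : Nat) (d : B)
    (h : k < l.length) : (l.map f).getD k d = f l[k] := by
  rw [List.getD_eq_getElem _ _ (by simpa using h)]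
  simp

-- edges are made of path vertices
theorem edgesOf_fst_mem (path : List Int) (e : Int × Int) (he : e ∈ edgesOf path) : e.1 ∈ path := by
  unfold edgesOf at he
  rw [foldl_mem_iff _ _
        (fun i x => x = (min (PySem.List.pyGetD path i 0) (PySem.List.pyGetD path (i + 1) 0),
                         max (PySem.List.pyGetD path i 0) (PySem.List.pyGetD path (i + 1) 0)))
        (fun s i x => PySem.Set.mem_add s _ x)] at he
  rcases he with h | ⟨i, hi, rfl⟩
  · simp [PySem.Set.empty] at h
  · rw [PySem.List.mem_pyRange_one] at hi
    have hu : PySem.List.pyGetD path i 0 = path[i.toNat] :=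
      PySem.List.pyGetD_eq_getElem path 0 hi.1 (by omega)
    have hv : PySem.List.pyGetD path (i + 1) 0 = path[(i + 1).toNat] :=
      PySem.List.pyGetD_eq_getElem path 0 (by omega) (by omega)
    rcases le_total (PySem.List.pyGetD path i 0) (PySem.List.pyGetD path (i + 1) 0) with hle | hle
    · simp only [min_eq_left hle]
      rw [hu]; exact List.getElem_mem _
    · simp only [min_eq_right hle]
      rw [hv]; exact List.getElem_mem _

theorem edgeSets_eq_map (paths : List (List Int)) : edgeSets paths = paths.map edgesOf := by
  unfold edgeSets
  simpa using PySem.List.foldl_append_singleton_eq_map edgesOf paths []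

theorem mem_LP (paths : List (List Int)) (p : Int × Int) :
    p ∈ LP paths ↔ 0 ≤ p.1 ∧ p.1 < p.2 ∧ p.2 < nI paths := by
  unfold LP
  simp only [List.mem_flatMap, List.mem_map, PySem.List.mem_pyRange_one]
  constructor
  · rintro ⟨i, hi, j, hj, rfl⟩
    exact ⟨hi.1, by omega, hj.2⟩
  · rintro ⟨h0, h1, h2⟩
    exact ⟨p.1, ⟨h0, by omega⟩, p.2, ⟨by omega, h2⟩, rfl⟩

theorem condV_of_shared (paths : List (List Int)) (p : Int × Int)
    (hp : p ∈ LP paths) (v : Int)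
    (hvi : v ∈ paths[p.1.toNat]'(by rw [mem_LP] at hp; unfold nI at hp; omega))
    (hvj : v ∈ paths[p.2.toNat]'(by rw [mem_LP] at hp; unfold nI at hp; omega)) :
    condV paths p = true := by
  rw [mem_LP] at hp
  unfold nI at hp
  unfold condV pathSets
  rw [getD_map_lt _ _ _ _ (by omega), getD_map_lt _ _ _ _ (by omega)]
  cases hdis : PySem.Set.isdisjoint (PySem.Set.ofList (paths[p.1.toNat]'(by omega)))
      (PySem.Set.ofList (paths[p.2.toNat]'(by omega))) with
  | false => rfl
  | true =>
    exfalso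
    have := (PySem.Set.isdisjoint_iff _ _).mp hdis v ((PySem.Set.mem_ofList _ _).mpr hvi)
    exact this ((PySem.Set.mem_ofList _ _).mpr hvj)

theorem condV_shared (paths : List (List Int)) (p : Int × Int)
    (hp : p ∈ LP paths) (h : condV paths p = true) :
    ∃ v, v ∈ paths[p.1.toNat]'(by rw [mem_LP] at hp; unfold nI at hp; omega) ∧
         v ∈ paths[p.2.toNat]'(by rw [mem_LP] at hp; unfold nI at hp; omega) := by
  rw [mem_LP] at hp
  unfold nI at hp
  unfold condV pathSets at h
  rw [getD_map_lt _ _ _ _ (by omega), getD_map_lt _ _ _ _ (by omega)] at h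
  cases hdis : PySem.Set.isdisjoint (PySem.Set.ofList (paths[p.1.toNat]'(by omega)))
      (PySem.Set.ofList (paths[p.2.toNat]'(by omega))) with
  | true => rw [hdis] at h; simp at h
  | false =>
    have : ¬ ∀ x ∈ PySem.Set.ofList (paths[p.1.toNat]'(by omega)),
        x ∉ PySem.Set.ofList (paths[p.2.toNat]'(by omega)) := by
      intro hall
      rw [(PySem.Set.isdisjoint_iff _ _).mpr hall] at hdis
      exact Bool.true_eq_false.mp hdis
    push Not at this
    rcases this with ⟨v, hv1, hv2⟩
    exact ⟨v, (PySem.Set.mem_ofList _ _).mp hv1, (PySem.Set.mem_ofList _ _).mp hv2⟩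

-- the elif branch of A is redundant: sharing an edge implies sharing a vertex
theorem condE_imp_condV (paths : List (List Int)) (p : Int × Int)
    (hp : p ∈ LP paths) (h : condE paths p = true) : condV paths p = true := by
  have hb := (mem_LP paths p).mp hp
  unfold nI at hb
  unfold condE at h
  rw [edgeSets_eq_map, getD_map_lt _ _ _ _ (by omega), getD_map_lt _ _ _ _ (by omega)] at h
  have : ¬ ∀ x ∈ edgesOf (paths[p.1.toNat]'(by omega)),
      x ∉ edgesOf (paths[p.2.toNat]'(by omega)) := by
    intro hall
    rw [(PySem.Set.isdisjoint_iff _ _).mpr hall] at h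
    simp at h
  push Not at this
  rcases this with ⟨e, he1, he2⟩
  exact condV_of_shared paths p hp e.1 (edgesOf_fst_mem _ _ he1) (edgesOf_fst_mem _ _ he2)

-- A reduces to the canonical filtered fold
theorem A_eq (paths : List (List Int)) :
    build_conflict_graph paths =
      ((LPf paths).foldl (fun cs p => conflictAdd cs p.1 p.2) (initC paths)).map pySetList := by
  have h1 :
      (PySem.List.pyRange 0 ((paths.length : Int))).foldl
        (fun cs i =>
          (PySem.List.pyRange (i + 1) ((paths.length : Int))).foldl
            (fun cs j => pairCheck (pathSets paths) (edgeSets paths) cs i j)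
            cs)
        (initC paths)
      = (LP paths).foldl
          (fun cs p => pairCheck (pathSets paths) (edgeSets paths) cs p.1 p.2)
          (initC paths) := by
    unfold LP
    rw [List.foldl_flatMap]
    apply PySem.List.foldl_congr_mem
    intro acc i _
    rw [List.foldl_map]
    rfl
  have h0 : build_conflict_graph paths =
      ((PySem.List.pyRange 0 ((paths.length : Int))).foldl
        (fun cs i =>
          (PySem.List.pyRange (i + 1) ((paths.length : Int))).foldl
            (fun cs j => pairCheck (pathSets paths) (edgeSets paths) cs i j)
            cs)
        (initC paths)).map pySetList := rfl
  rw [h0, h1]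
  have h2 :
      (LP paths).foldl
          (fun cs p => pairCheck (pathSets paths) (edgeSets paths) cs p.1 p.2)
          (initC paths)
      = (LP paths).foldl
          (fun cs p =>
            if (condV paths p || condE paths p) then conflictAdd cs p.1 p.2 else cs)
          (initC paths) := by
    apply PySem.List.foldl_congr_mem
    intro acc p _
    show (if condV paths p then conflictAdd acc p.1 p.2
          else if condE paths p then conflictAdd acc p.1 p.2 else acc) = _
    cases hv : condV paths p <;> cases he : condE paths p <;> simp [*]
  rw [h2, PySem.List.foldl_if_eq_foldl_filter]
  have h3 : (LP paths).filter (fun p => condV paths p || condE paths p) = LPf paths := by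
    unfold LPf
    apply List.filter_congr
    intro p hp
    cases hv : condV paths p
    · cases he : condE paths p
      · simp
      · rw [condE_imp_condV paths p hp he] at hv
        exact absurd hv (by simp)
    · simp
  rw [h3]

-- the vertex -> path-ids bitmask dict: one path's inner loop
theorem inner_getD_mask (bit : Int) : ∀ (l : List Int), l.Nodup → ∀ (d : PySem.Dict Int Int) (v : Int),
    (l.foldl (fun d u => d.insert u (PySem.Int.bor (d.getD u 0) bit)) d).getD v 0
      = if v ∈ l then PySem.Int.bor (d.getD v 0) bit else d.getD v 0 := by
  intro l
  induction l with
  | nil => simp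
  | cons u t ih =>
    intro hnd d v
    rcases List.nodup_cons.mp hnd with ⟨hu, ht⟩
    rw [List.foldl_cons, ih ht]
    by_cases hv : v = u
    · subst hv
      simp [hu]
    · simp [PySem.Dict.getD_insert, hv, List.mem_cons]

def mStep (d : PySem.Dict Int Int) (ip : Int × List Int) : PySem.Dict Int Int :=
  (PySem.Set.ofList ip.2).foldl
    (fun d v => d.insert v (PySem.Int.bor (d.getD v 0) ((2 : Int) ^ ip.1.toNat))) d

theorem mStep_nonneg (d : PySem.Dict Int Int) (ip : Int × List Int)
    (h : ∀ v, 0 ≤ d.getD v 0) : ∀ v, 0 ≤ (mStep d ip).getD v 0 := by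
  intro v
  unfold mStep
  rw [inner_getD_mask _ _ (PySem.Set.nodup_ofList ip.2)]
  by_cases hv : v ∈ PySem.Set.ofList ip.2
  · rw [if_pos hv, PySem.Int.bor_of_nonneg (h v) (by positivity)]
    exact Int.natCast_nonneg _
  · rw [if_neg hv]
    exact h v

theorem masks_fold_nonneg : ∀ (ps : List (Int × List Int)) (d : PySem.Dict Int Int),
    (∀ v, 0 ≤ d.getD v 0) → ∀ v, 0 ≤ (ps.foldl mStep d).getD v 0 := by
  intro ps
  induction ps with
  | nil => exact fun d h => h
  | cons ip t ih => exact fun d h => ih _ (mStep_nonneg d ip h)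

theorem getElem_congr_mem {v : Int} {l : List (List Int)} {t1 t2 : Nat}
    (h : t1 = t2) (h1 : t1 < l.length) (h2 : t2 < l.length) (hm : v ∈ l[t1]) : v ∈ l[t2] := by
  subst h; exact hm

theorem mStep_tb (d : PySem.Dict Int Int) (ip : Int × List Int) (hip : 0 ≤ ip.1)
    (h : ∀ v, 0 ≤ d.getD v 0) (v : Int) (k : Nat) :
    (((mStep d ip).getD v 0).toNat.testBit k = true)
      ↔ ((d.getD v 0).toNat.testBit k = true) ∨ (v ∈ ip.2 ∧ ip.1 = (k : Int)) := by
  unfold mStep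
  rw [inner_getD_mask _ _ (PySem.Set.nodup_ofList ip.2)]
  by_cases hv : v ∈ ip.2
  · rw [if_pos ((PySem.Set.mem_ofList _ _).mpr hv),
        PySem.Int.bor_of_nonneg (h v) (by positivity)]
    have h2 : ((2 : Int) ^ ip.1.toNat).toNat = 2 ^ ip.1.toNat := by
      rw [show ((2 : Int) ^ ip.1.toNat) = ((2 ^ ip.1.toNat : Nat) : Int) by push_cast; ring]
      exact Int.toNat_natCast _
    rw [Int.toNat_natCast, Nat.testBit_lor, h2, Nat.testBit_two_pow]
    simp only [Bool.or_eq_true, decide_eq_true_eq]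
    constructor
    · rintro (hb | hb)
      · exact Or.inl hb
      · exact Or.inr ⟨hv, by omega⟩
    · rintro (hb | ⟨_, hb⟩)
      · exact Or.inl hb
      · exact Or.inr (by omega)
  · rw [if_neg (fun hc => hv ((PySem.Set.mem_ofList _ _).mp hc))]
    simp [hv]

theorem masks_fold_tb : ∀ (ps : List (Int × List Int)) (d : PySem.Dict Int Int),
    (∀ ip ∈ ps, 0 ≤ ip.1) → (∀ v, 0 ≤ d.getD v 0) → ∀ (v : Int) (k : Nat),
    (((ps.foldl mStep d).getD v 0).toNat.testBit k = true)
      ↔ ((d.getD v 0).toNat.testBit k = true) ∨ ∃ ip ∈ ps, v ∈ ip.2 ∧ ip.1 = (k : Int) := by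
  intro ps
  induction ps with
  | nil => simp
  | cons ip t ih =>
    intro d hpos h v k
    rw [List.foldl_cons,
        ih _ (fun q hq => hpos q (List.mem_cons_of_mem _ hq)) (mStep_nonneg d ip h),
        mStep_tb d ip (hpos ip List.mem_cons_self) h]
    simp only [List.mem_cons]
    constructor
    · rintro ((hb | hb) | ⟨e, he, hm⟩)
      · exact Or.inl hb
      · exact Or.inr ⟨ip, Or.inl rfl, hb⟩
      · exact Or.inr ⟨e, Or.inr he, hm⟩
    · rintro (hb | ⟨e, (rfl | he), hm⟩)
      · exact Or.inl (Or.inl hb)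
      · exact Or.inl (Or.inr hm)
      · exact Or.inr ⟨e, he, hm⟩

theorem masks_nonneg (paths : List (List Int)) (v : Int) : 0 ≤ (masksOf paths).getD v 0 := by
  unfold masksOf
  refine masks_fold_nonneg _ _ (fun v => ?_) v
  rw [PySem.Dict.getD_of_get?_eq_none _ _ (PySem.Dict.get?_empty v)]

theorem masks_tb (paths : List (List Int)) (v : Int) (k : Nat) :
    (((masksOf paths).getD v 0).toNat.testBit k = true)
      ↔ ∃ h : k < paths.length, v ∈ paths[k] := by
  unfold masksOf
  rw [show (PySem.List.enumerate paths).foldl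
      (fun masks ip => (PySem.Set.ofList ip.2).foldl
        (fun masks v => masks.insert v (PySem.Int.bor (masks.getD v 0) ((2 : Int) ^ ip.1.toNat)))
        masks) PySem.Dict.empty
    = (PySem.List.enumerate paths).foldl mStep PySem.Dict.empty from rfl]
  rw [masks_fold_tb _ _
      (fun ip hip => by
        rw [PySem.List.mem_enumerate_iff] at hip
        rcases hip with ⟨k', _, rfl⟩
        omega)
      (fun v => by rw [PySem.Dict.getD_of_get?_eq_none _ _ (PySem.Dict.get?_empty v)])]
  rw [PySem.Dict.getD_of_get?_eq_none _ _ (PySem.Dict.get?_empty v)]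
  simp only [Int.toNat_zero, Nat.zero_testBit, Bool.false_eq_true, false_or]
  constructor
  · rintro ⟨ip, hip, hv, hk⟩
    rw [PySem.List.mem_enumerate_iff] at hip
    rcases hip with ⟨k', hk', rfl⟩
    simp only at hv hk
    have : k' = k := by omega
    subst this
    exact ⟨hk', hv⟩
  · rintro ⟨hk, hv⟩
    refine ⟨((k : Int), paths[k]), ?_, hv, rfl⟩
    rw [PySem.List.mem_enumerate_iff]
    exact ⟨k, hk, by simp⟩

-- the per-path combined mask
theorem bor_fold_nonneg (f : Int → Int) (hf : ∀ v, 0 ≤ f v) :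
    ∀ (l : List Int) (m0 : Int), 0 ≤ m0 →
      0 ≤ l.foldl (fun m v => PySem.Int.bor m (f v)) m0 := by
  intro l
  induction l with
  | nil => exact fun m0 h => h
  | cons u t ih =>
    intro m0 h
    rw [List.foldl_cons]
    refine ih _ ?_
    rw [PySem.Int.bor_of_nonneg h (hf u)]
    exact Int.natCast_nonneg _

theorem bor_fold_tb (f : Int → Int) (hf : ∀ v, 0 ≤ f v) :
    ∀ (l : List Int) (m0 : Int), 0 ≤ m0 → ∀ k : Nat,
      ((l.foldl (fun m v => PySem.Int.bor m (f v)) m0).toNat.testBit k = true)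
        ↔ (m0.toNat.testBit k = true) ∨ ∃ v ∈ l, (f v).toNat.testBit k = true := by
  intro l
  induction l with
  | nil => simp
  | cons u t ih =>
    intro m0 h k
    rw [List.foldl_cons, ih _ (by
      rw [PySem.Int.bor_of_nonneg h (hf u)]; exact Int.natCast_nonneg _)]
    rw [PySem.Int.bor_of_nonneg h (hf u), Int.toNat_natCast, Nat.testBit_lor]
    simp only [Bool.or_eq_true, List.mem_cons]
    constructor
    · rintro ((hb | hb) | ⟨v, hv, hb⟩)
      · exact Or.inl hb
      · exact Or.inr ⟨u, Or.inl rfl, hb⟩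
      · exact Or.inr ⟨v, Or.inr hv, hb⟩
    · rintro (hb | ⟨v, (rfl | hv), hb⟩)
      · exact Or.inl (Or.inl hb)
      · exact Or.inl (Or.inr hb)
      · exact Or.inr ⟨v, hv, hb⟩

theorem bigM_nonneg (paths : List (List Int)) (path : List Int) : 0 ≤ bigM paths path :=
  bor_fold_nonneg _ (masks_nonneg paths) _ 0 le_rfl

theorem bigM_tb (paths : List (List Int)) (path : List Int) (k : Nat) :
    ((bigM paths path).toNat.testBit k = true)
      ↔ ∃ v ∈ path, ∃ h : k < paths.length, v ∈ paths[k] := by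
  unfold bigM
  rw [bor_fold_tb _ (masks_nonneg paths) _ 0 le_rfl k]
  simp only [Int.toNat_zero, Nat.zero_testBit, Bool.false_eq_true, false_or]
  constructor
  · rintro ⟨v, hv, hb⟩
    exact ⟨v, (PySem.Set.mem_ofList _ _).mp hv, (masks_tb paths v k).mp hb⟩
  · rintro ⟨v, hv, hb⟩
    exact ⟨v, (PySem.Set.mem_ofList _ _).mpr hv, (masks_tb paths v k).mpr hb⟩

-- the bit-extraction loop
theorem emitBits_eq (i : Int) : ∀ (t : Nat) (m : Int), m.toNat = t → ∀ (j : Int) (cs : List (PySem.Set Int)),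
    emitBits i cs m j = (bitsFrom m j).foldl (fun cs x => conflictAdd cs i x) cs := by
  intro t
  induction t using Nat.strong_induction_on with
  | _ t ih =>
    intro m hm j cs
    by_cases h0 : m ≤ 0
    · rw [emitBits, bitsFrom]
      simp [h0]
    · rw [emitBits, bitsFrom]
      simp only [h0, dite_false]
      have hdiv : PySem.Int.floordiv m 2 = m / 2 :=
        PySem.Int.floordiv_eq_ediv_of_pos (by omega)
      have hlt : (PySem.Int.floordiv m 2).toNat < t := by
        rw [hdiv]; omega
      rw [ih _ hlt _ rfl]
      by_cases hb : PySem.Int.band m 1 = 1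
      · simp [hb]
      · simp [hb]

theorem bits_mem : ∀ (t : Nat) (m : Int), m.toNat = t → 0 ≤ m → ∀ (j x : Int),
    (x ∈ bitsFrom m j ↔ ∃ k : Nat, m.toNat.testBit k = true ∧ x = j + (k : Int)) := by
  intro t
  induction t using Nat.strong_induction_on with
  | _ t ih =>
    intro m hm hpos j x
    by_cases h0 : m ≤ 0
    · rw [bitsFrom]
      have : m = 0 := by omega
      subst this
      simp
    · rw [bitsFrom]
      simp only [h0, dite_false, List.mem_append]
      have hdiv : PySem.Int.floordiv m 2 = m / 2 :=
        PySem.Int.floordiv_eq_ediv_of_pos (by omega)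
      have hlt : (PySem.Int.floordiv m 2).toNat < t := by rw [hdiv]; omega
      have hdt : (PySem.Int.floordiv m 2).toNat = m.toNat / 2 := by rw [hdiv]; omega
      have hband : (PySem.Int.band m 1 = 1) ↔ m.toNat % 2 = 1 := by
        rw [PySem.Int.band_one]
        have hmod : PySem.Int.mod m 2 = ((m.toNat % 2 : Nat) : Int) := by
          rw [show m = ((m.toNat : Nat) : Int) by omega]
          exact_mod_cast PySem.Int.mod_natCast m.toNat 2
        rw [hmod]
        omega
      rw [ih _ hlt _ rfl (by rw [hdiv]; omega) (j + 1) x]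
      constructor
      · rintro (hx | ⟨k, hk, rfl⟩)
        · refine ⟨0, ?_, ?_⟩
          · rw [Nat.testBit_zero]
            by_cases hb : PySem.Int.band m 1 = 1
            · simp [hband.mp hb]
            · rw [if_neg hb] at hx
              simp at hx
          · by_cases hb : PySem.Int.band m 1 = 1
            · rw [if_pos hb] at hx
              simp at hx
              omega
            · rw [if_neg hb] at hx
              simp at hx
        · refine ⟨k + 1, ?_, by push_cast; ring⟩
          rw [Nat.testBit_succ]
          rw [hdt] at hk
          exact hk
      · rintro ⟨k, hk, rfl⟩
        cases k with
        | zero =>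
          left
          rw [Nat.testBit_zero] at hk
          simp only [decide_eq_true_eq] at hk
          rw [if_pos (hband.mpr hk)]
          simp
        | succ k' =>
          right
          refine ⟨k', ?_, by push_cast; ring⟩
          rw [Nat.testBit_succ] at hk
          rwa [hdt]

theorem bits_pairwise : ∀ (t : Nat) (m : Int), m.toNat = t → 0 ≤ m → ∀ (j : Int),
    (bitsFrom m j).Pairwise (· < ·) := by
  intro t
  induction t using Nat.strong_induction_on with
  | _ t ih =>
    intro m hm hpos j
    by_cases h0 : m ≤ 0
    · rw [bitsFrom]; simp [h0]
    · rw [bitsFrom]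
      simp only [h0, dite_false]
      have hdiv : PySem.Int.floordiv m 2 = m / 2 :=
        PySem.Int.floordiv_eq_ediv_of_pos (by omega)
      have hlt : (PySem.Int.floordiv m 2).toNat < t := by rw [hdiv]; omega
      have hrec := ih _ hlt _ rfl (by rw [hdiv]; omega) (j + 1)
      have hbound : ∀ x ∈ bitsFrom (PySem.Int.floordiv m 2) (j + 1), j < x := by
        intro x hx
        rw [bits_mem _ _ rfl (by rw [hdiv]; omega) _ _] at hx
        rcases hx with ⟨k, _, rfl⟩
        omega
      rw [List.pairwise_append]
      refine ⟨?_, hrec, ?_⟩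
      · by_cases hb : PySem.Int.band m 1 = 1 <;> simp [hb]
      · intro x hx y hy
        by_cases hb : PySem.Int.band m 1 = 1
        · rw [if_pos hb] at hx
          simp only [List.mem_singleton] at hx
          subst hx
          exact hbound y hy
        · rw [if_neg hb] at hx
          simp at hx

theorem eq_of_pairwise_lt_of_mem_iff (xs ys : List Int)
    (hx : xs.Pairwise (· < ·)) (hy : ys.Pairwise (· < ·))
    (h : ∀ a, a ∈ xs ↔ a ∈ ys) : xs = ys := by
  have hxn : xs.Nodup := by
    refine List.Pairwise.imp ?_ hx
    intro a b hlt hc; omega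
  have hyn : ys.Nodup := by
    refine List.Pairwise.imp ?_ hy
    intro a b hlt hc; omega
  have hperm : ys.Perm xs := by
    rw [List.perm_ext_iff_of_nodup hyn hxn]
    exact fun a => (h a).symm
  calc xs = PySem.List.sorted xs (fun x => x) :=
        (PySem.List.sorted_eq_self_of_pairwise xs _ (hx.imp le_of_lt)).symm
    _ = ys := PySem.List.sorted_eq_of_perm_of_pairwise_lt xs ys _ hperm hy

-- the per-path bit list is exactly the filtered index range
theorem bits_eq_filter (paths : List (List Int)) (i : Int) (hi : 0 ≤ i ∧ i < nI paths) :
    bitsFrom (PySem.Int.floordiv (bigM paths (PySem.List.pyGetD paths i []))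
        ((2 : Int) ^ (i + 1).toNat)) (i + 1)
      = (PySem.List.pyRange (i + 1) (nI paths)).filter (fun j => condV paths (i, j)) := by
  unfold nI at hi
  have hMpos : 0 ≤ bigM paths (PySem.List.pyGetD paths i []) := bigM_nonneg _ _
  have hppos : (0 : Int) < (2 : Int) ^ (i + 1).toNat := by positivity
  have hdiv : PySem.Int.floordiv (bigM paths (PySem.List.pyGetD paths i []))
      ((2 : Int) ^ (i + 1).toNat)
      = bigM paths (PySem.List.pyGetD paths i []) / (2 : Int) ^ (i + 1).toNat :=
    PySem.Int.floordiv_eq_ediv_of_pos hppos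
  have hqpos : 0 ≤ PySem.Int.floordiv (bigM paths (PySem.List.pyGetD paths i []))
      ((2 : Int) ^ (i + 1).toNat) := by
    rw [hdiv]
    exact Int.ediv_nonneg hMpos (le_of_lt hppos)
  have htq : ∀ k : Nat,
      ((PySem.Int.floordiv (bigM paths (PySem.List.pyGetD paths i []))
          ((2 : Int) ^ (i + 1).toNat)).toNat.testBit k = true)
        ↔ ((bigM paths (PySem.List.pyGetD paths i [])).toNat.testBit (k + (i + 1).toNat) = true) := by
    intro k
    have h1 : (bigM paths (PySem.List.pyGetD paths i []) / (2 : Int) ^ (i + 1).toNat).toNat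
        = (bigM paths (PySem.List.pyGetD paths i [])).toNat / 2 ^ (i + 1).toNat := by
      rw [show (2 : Int) ^ (i + 1).toNat = ((2 ^ (i + 1).toNat : Nat) : Int) by push_cast; ring,
          show bigM paths (PySem.List.pyGetD paths i [])
            = (((bigM paths (PySem.List.pyGetD paths i [])).toNat : Nat) : Int) by omega,
          ← Int.natCast_div]
      simp only [Int.toNat_natCast]
    rw [hdiv, h1, Nat.testBit_div_two_pow]
  have hpath : PySem.List.pyGetD paths i [] = paths[i.toNat]'(by omega) :=
    PySem.List.pyGetD_eq_getElem paths [] (by omega) (by omega)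
  apply eq_of_pairwise_lt_of_mem_iff
  · exact bits_pairwise _ _ rfl hqpos _
  · exact (pairwise_lt_pyRange _ _).sublist List.filter_sublist
  · intro x
    rw [bits_mem _ _ rfl hqpos, List.mem_filter, PySem.List.mem_pyRange_one]
    constructor
    · rintro ⟨k, hk, rfl⟩
      rw [htq k, bigM_tb] at hk
      rcases hk with ⟨v, hv, hkl, hvk⟩
      have hxmem : ((i, i + 1 + (k : Int)) : Int × Int) ∈ LP paths := by
        rw [mem_LP]
        unfold nI
        exact ⟨hi.1, by omega, by omega⟩
      refine ⟨⟨by omega, by unfold nI; omega⟩, condV_of_shared paths _ hxmem v ?_ ?_⟩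
      · rw [hpath] at hv
        exact hv
      · exact getElem_congr_mem (by omega) (by omega) (by omega) hvk
    · rintro ⟨⟨hx1, hx2⟩, hcv⟩
      unfold nI at hx2
      have hxmem : ((i, x) : Int × Int) ∈ LP paths := by
        rw [mem_LP]
        unfold nI
        exact ⟨hi.1, by omega, by omega⟩
      rcases condV_shared paths _ hxmem hcv with ⟨v, hv1, hv2⟩
      refine ⟨x.toNat - (i + 1).toNat, ?_, by omega⟩
      rw [htq, bigM_tb]
      refine ⟨v, ?_, by omega, ?_⟩
      · rw [hpath]
        simpa using hv1
      · exact getElem_congr_mem (by omega) (by omega) (by omega) hv2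

theorem filter_flatMap_comm {A B : Type} (l : List A) (f : A → List B) (p : B → Bool) :
    (l.flatMap f).filter p = l.flatMap (fun a => (f a).filter p) := by
  induction l with
  | nil => rfl
  | cons a t ih => simp [List.flatMap_cons, List.filter_append, ih]

-- B reduces to the same fold
theorem B_eq (paths : List (List Int)) :
    build_conflict_graph_alt paths =
      ((LPf paths).foldl (fun cs p => conflictAdd cs p.1 p.2) (initC paths)).map pySetList := by
  have h0 : build_conflict_graph_alt paths =
      ((PySem.List.enumerate paths).foldl
        (fun cs ip =>
          emitBits ip.1 cs
            (PySem.Int.floordiv (bigM paths ip.2) ((2 : Int) ^ (ip.1 + 1).toNat)) (ip.1 + 1))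
        (initC paths)).map (fun c => pySetList c) := rfl
  have hLPf : LPf paths =
      (PySem.List.pyRange 0 (nI paths)).flatMap
        (fun i => ((PySem.List.pyRange (i + 1) (nI paths)).filter
            (fun j => condV paths (i, j))).map (fun j => (i, j))) := by
    unfold LPf LP
    rw [filter_flatMap_comm]
    congr 1
    funext i
    rw [List.filter_map]
    rfl
  rw [h0, hLPf, List.foldl_flatMap,
      PySem.List.enumerate_eq_map_pyRange paths [], List.foldl_map]
  have hlen : PySem.List.len paths = nI paths := rfl
  rw [hlen]
  refine congrArg (List.map pySetList) ?_
  apply PySem.List.foldl_congr_mem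
  intro acc x hx
  rw [PySem.List.mem_pyRange_one] at hx
  show emitBits x acc
      (PySem.Int.floordiv (bigM paths (PySem.List.pyGetD paths x []))
        ((2 : Int) ^ (x + 1).toNat)) (x + 1)
    = (((PySem.List.pyRange (x + 1) (nI paths)).filter
          (fun j => condV paths (x, j))).map (fun j => (x, j))).foldl
        (fun cs p => conflictAdd cs p.1 p.2) acc
  rw [List.foldl_map, emitBits_eq x _ _ rfl, bits_eq_filter paths x ⟨hx.1, hx.2⟩]

-- ===== VERDICT (by name: the statement is the Claim_ definition above) =====
theorem build_conflict_graph_spec : Claim_equal_build_conflict_graph := by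
  intro paths _
  unfold Spec_build_conflict_graph
  rw [A_eq, B_eq]
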